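-- pv_equiv track=rewrite | github.com/kettly1260/chemdeep | apps/telegram_bot/ui/keyboards.py | build_help_menu
-- ===== SOURCE A (Python) =====
-- def build_help_menu(groups: list):
--     """帮助菜单"""
--     # Grid of groups
--
--     # Map common groups to Chinese
--     group_map = {
--         "Basic": "📌 基础",
--         "Config": "⚙️ 配置",
--         "Execution": "🚀 任务",
--         "Reporting": "📄 报告"
--     }
--
--     keyboard = []
--     row = []
--     for g in groups:
--         label = group_map.get(g, g)
--         row.append({"text": label, "callback_data": f"help:{g}"})
--         if len(row) == 2:
--             keyboard.append(row)
--             row = []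
--     if row:
--         keyboard.append(row)
--
--     # All / Back
--     keyboard.append([
--         {"text": "📚 全部命令", "callback_data": "help:all"}
--     ])
--
--     return {"inline_keyboard": keyboard}
-- ===== SOURCE B (Python) =====
-- GROUP_MAP = {
--     "Basic": "📌 基础",
--     "Config": "⚙️ 配置",
--     "Execution": "🚀 任务",
--     "Reporting": "📄 报告"
-- }
--
-- def _btn(g):
--     return {"text": GROUP_MAP.get(g, g), "callback_data": f"help:{g}"}
--
-- def build_help_menu(groups: list):
--     keyboard = [[_btn(g) for g in groups[i:i+2]] for i in range(0, len(groups), 2)]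
--     keyboard.append([{"text": "📚 全部命令", "callback_data": "help:all"}])
--     return {"inline_keyboard": keyboard}
-- ===== Notes on version B (the rewrite author's own statement) =====
-- stated objective: simpler
-- what changed: Replaces A's accumulator-and-flush loop over a mutable row buffer with direct indexed slicing: one comprehension over range(0, len(groups), 2) builds each two-button row from groups[i:i+2].
import Mathlib
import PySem

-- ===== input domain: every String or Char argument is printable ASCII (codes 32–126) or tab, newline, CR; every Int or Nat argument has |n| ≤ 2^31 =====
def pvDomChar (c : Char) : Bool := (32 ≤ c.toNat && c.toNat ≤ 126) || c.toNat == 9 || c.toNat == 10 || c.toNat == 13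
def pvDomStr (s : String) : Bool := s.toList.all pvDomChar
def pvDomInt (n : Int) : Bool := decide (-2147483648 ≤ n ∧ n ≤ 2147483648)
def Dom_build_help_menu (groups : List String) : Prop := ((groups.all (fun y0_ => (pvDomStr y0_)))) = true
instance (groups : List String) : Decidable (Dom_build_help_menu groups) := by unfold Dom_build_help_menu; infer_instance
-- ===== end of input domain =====

-- B replaces A's accumulator-and-flush loop with an indexed-slicing comprehension over range(0, len, 2) (simpler decomposition, same cost).

-- the group_map dict literal, shared verbatim by both Pythons (dict.get(g, g))
def groupMap : PySem.Dict String String :=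
  PySem.Dict.ofList [("Basic", "📌 基础"), ("Config", "⚙️ 配置"), ("Execution", "🚀 任务"), ("Reporting", "📄 报告")]

-- ===== PORT A =====
-- A's loop body: state (keyboard, row); append a button to row, flush row when it has 2 entries
def stepA (st : List (List (List (String × String))) × List (List (String × String))) (g : String) :
    List (List (List (String × String))) × List (List (String × String)) :=
  let label := PySem.Dict.getD groupMap g g
  let row := st.2 ++ [[("text", label), ("callback_data", "help:" ++ g)]]
  if row.length == 2 then (st.1 ++ [row], []) else (st.1, row)

def build_help_menu (groups : List String) : List (String × List (List (List (String × String)))) :=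
  let st := groups.foldl stepA ([], [])
  let keyboard := if st.2.isEmpty then st.1 else st.1 ++ [st.2]
  [("inline_keyboard", keyboard ++ [[[("text", "📚 全部命令"), ("callback_data", "help:all")]]])]

-- ===== PORT B =====
-- _btn(g)
def btnB (g : String) : List (String × String) :=
  [("text", PySem.Dict.getD groupMap g g), ("callback_data", "help:" ++ g)]

def build_help_menu_alt (groups : List String) : List (String × List (List (List (String × String)))) :=
  let keyboard := (PySem.List.pyRange 0 (groups.length : Int) 2).map
      (fun i => (PySem.List.slice groups (some i) (some (i + 2))).map btnB)
  [("inline_keyboard", keyboard ++ [[[("text", "📚 全部命令"), ("callback_data", "help:all")]]])]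

-- ===== PRECONDITION & SPEC =====
def Spec_build_help_menu (groups : List String) (out : List (String × List (List (List (String × String))))) : Prop := out = build_help_menu_alt groups
instance (groups : List String) (out : List (String × List (List (List (String × String))))) : Decidable (Spec_build_help_menu groups out) := by unfold Spec_build_help_menu; infer_instance

-- ===== CLAIM (what is proved, stated in full; the proofs are below) =====
def Claim_equal_build_help_menu : Prop := ∀ (groups : List String), Dom_build_help_menu groups → Spec_build_help_menu groups (build_help_menu groups)

-- ===== LEMMAS AND PROOFS =====

-- the common normal form: rows of two buttons, last row possibly one
def rowsN : List String → List (List (List (String × String)))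
  | [] => []
  | [a] => [[btnB a]]
  | a :: b :: t => [btnB a, btnB b] :: rowsN t

theorem pr2_nil (a b : Int) (h : b ≤ a) : PySem.List.pyRange a b 2 = [] := by
  simp [PySem.List.pyRange]
  omega

theorem pr2_cons (a b : Int) (h : a < b) :
    PySem.List.pyRange a b 2 = a :: PySem.List.pyRange (a + 2) b 2 := by
  simp only [PySem.List.pyRange]
  norm_num
  rw [if_pos h]
  by_cases h2 : a + 2 < b
  · rw [if_pos h2]
    have hn : ((b - a + 2 - 1) / 2).toNat = ((b - (a + 2) + 2 - 1) / 2).toNat + 1 := by omega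
    rw [hn, List.range_succ_eq_map, List.map_cons, List.map_map]
    simp only [List.cons.injEq]
    constructor
    · push_cast; ring
    · apply List.map_congr_left
      intro k _
      simp only [Function.comp]
      push_cast; ring
  · rw [if_neg h2]
    have hn : ((b - a + 2 - 1) / 2).toNat = 1 := by omega
    rw [hn]
    simp

-- A's loop plus final flush yields kb ++ rowsN gs
theorem foldA_rowsN (gs : List String) : ∀ (kb : List (List (List (String × String)))),
    (let st := List.foldl stepA (kb, []) gs
     if st.2.isEmpty then st.1 else st.1 ++ [st.2]) = kb ++ rowsN gs := by
  induction gs using rowsN.induct with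
  | case1 => intro kb; simp [rowsN]
  | case2 a => intro kb; simp [rowsN, stepA, btnB]
  | case3 a b t ih =>
      intro kb
      have := ih (kb ++ [[btnB a, btnB b]])
      simpa [rowsN, stepA, btnB, List.append_assoc] using this

-- B's slicing comprehension also yields rowsN, starting at any even offset j
theorem mapSlicesAux : ∀ (n : ℕ) (all : List String) (j : ℕ), all.length ≤ j + n →
    (PySem.List.pyRange (j : Int) (all.length : Int) 2).map
      (fun i => (PySem.List.slice all (some i) (some (i + 2))).map btnB) = rowsN (all.drop j) := by
  intro n
  induction n with
  | zero =>
      intro all j hle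
      rw [pr2_nil _ _ (by exact_mod_cast hle)]
      rw [List.drop_eq_nil_of_le (by omega)]
      simp [rowsN]
  | succ n ih =>
      intro all j hle
      by_cases hj : j < all.length
      · have hlt : (j : Int) < (all.length : Int) := by exact_mod_cast hj
        rw [pr2_cons _ _ hlt, List.map_cons]
        have hs : PySem.List.slice all (some (j : Int)) (some ((j : Int) + 2)) = (all.drop j).take 2 := by
          have h2 : ((j : Int) + 2) = ((j : Int) + ((2 : ℕ) : Int)) := by push_cast; ring
          rw [h2, PySem.List.slice_natCast_add]
        have hc : (j : Int) + 2 = (((j + 2 : ℕ)) : Int) := by push_cast; ring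
        rw [hs, hc, ih all (j + 2) (by omega)]
        obtain ⟨a, rest, hd⟩ : ∃ a rest, all.drop j = a :: rest := by
          cases hdrop : all.drop j with
          | nil =>
              exfalso
              have := List.drop_eq_nil_iff.mp hdrop
              omega
          | cons a rest => exact ⟨a, rest, rfl⟩
        have hdd : all.drop (j + 2) = rest.drop 1 := by
          have : all.drop (j + 2) = (all.drop j).drop 2 := by
            rw [List.drop_drop]
          rw [this, hd]
          rfl
        rw [hd, hdd]
        cases rest with
        | nil => simp [rowsN]
        | cons b t => simp [rowsN]
      · rw [pr2_nil _ _ (by exact_mod_cast (by omega : all.length ≤ j))]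
        rw [List.drop_eq_nil_of_le (by omega)]
        simp [rowsN]

theorem mapSlices_rowsN (groups : List String) :
    (PySem.List.pyRange 0 (groups.length : Int) 2).map
      (fun i => (PySem.List.slice groups (some i) (some (i + 2))).map btnB) = rowsN groups := by
  have := mapSlicesAux groups.length groups 0 (by omega)
  simpa using this

-- ===== VERDICT (by name: the statement is the Claim_ definition above) =====
theorem build_help_menu_spec : Claim_equal_build_help_menu := by
  intro groups _
  show build_help_menu groups = build_help_menu_alt groups
  unfold build_help_menu build_help_menu_alt
  have hA := foldA_rowsN groups []
  simp only [List.nil_append] at hA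
  simp only [hA, mapSlices_rowsN]
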